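-- pv_equiv track=rewrite | github.com/jadenl99/JPCP-tool | crop_slab/V0/crop_slab/crop_slab_image.py | get_im_id
-- ===== SOURCE A (Python) =====
-- def get_im_id(s):
--
--     # From util file; retrieves image by ID
--     s = s[::-1]
--     start_index = -1
--     end_index = -1
--     for i, c in enumerate(s):
--         if c.isdigit():
--             end_index = i + 1
--             if start_index == -1:
--                 start_index = i
--         elif start_index > -1:
--             break
--
--     if start_index == -1:
--         return None
--
--     return int(s[start_index:end_index][::-1])
-- ===== SOURCE B (Python) =====
-- def get_im_id(s):
--     # Single forward pass: collect all maximal digit runs, return the last one.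
--     runs = []
--     cur = ''
--     for c in s:
--         if c.isdigit():
--             cur += c
--         elif cur:
--             runs.append(cur)
--             cur = ''
--     if cur:
--         runs.append(cur)
--     return int(runs[-1]) if runs else None
-- ===== Notes on version B (the rewrite author's own statement) =====
-- stated objective: simpler
-- what changed: one forward pass that accumulates every maximal digit run and returns the last, instead of reversing the string, scanning with enumerate indices and break, then slicing and re-reversing (also skips building the reversed copy)
import Mathlib
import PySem

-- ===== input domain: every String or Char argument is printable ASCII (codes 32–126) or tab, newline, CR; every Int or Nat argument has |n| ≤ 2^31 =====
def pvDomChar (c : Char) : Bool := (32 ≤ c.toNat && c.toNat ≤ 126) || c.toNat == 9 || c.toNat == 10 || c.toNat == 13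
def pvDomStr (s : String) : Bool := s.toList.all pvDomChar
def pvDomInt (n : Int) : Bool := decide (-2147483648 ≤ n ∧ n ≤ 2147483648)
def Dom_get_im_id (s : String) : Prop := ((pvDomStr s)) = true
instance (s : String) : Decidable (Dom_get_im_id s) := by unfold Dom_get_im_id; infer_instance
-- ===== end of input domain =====

-- B replaces A's reverse-scan-with-break-and-slice by one forward pass collecting all
-- maximal digit runs and returning the last (simpler; same cost).


-- ===== PORT A =====
-- the 'for i, c in enumerate(s): …' loop with its break, over state (start_index, end_index)
def pvLoopA : List (Int × Char) → Int → Int → Int × Int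
  | [], st, en => (st, en)
  | (i, c) :: rest, st, en =>
    if PySem.Chars.isdigit c then
      pvLoopA rest (if st = -1 then i else st) (i + 1)   -- end_index = i+1; if start_index == -1: start_index = i
    else if st > -1 then (st, en)                        -- break
    else pvLoopA rest st en

def get_im_id (s : String) : Option Int :=
  let m := s.toList.reverse        -- s = s[::-1]  (PySem.List.slice?_none_none_neg_one: xs[::-1] is reverse; iterating a str yields its chars)
  let r := pvLoopA (PySem.List.enumerate m 0) (-1) (-1)
  if r.1 = -1 then none
  else PySem.Int.ofChars? ((PySem.List.slice m (some r.1) (some r.2)).reverse)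
       -- int(s[start_index:end_index][::-1]); ofChars? none = ValueError (never reached: the slice is a nonempty digit run)

-- ===== PORT B =====
-- the 'for c in s' loop over state (runs, cur)
def pvStepB (acc : List (List Char) × List Char) (c : Char) : List (List Char) × List Char :=
  if PySem.Chars.isdigit c then (acc.1, acc.2 ++ [c])          -- cur += c
  else if acc.2 = [] then acc else (acc.1 ++ [acc.2], [])      -- elif cur: runs.append(cur); cur = ''

def get_im_id_alt (s : String) : Option Int :=
  let st := s.toList.foldl pvStepB ([], [])
  let runs := st.1 ++ (if st.2 = [] then [] else [st.2])       -- final 'if cur: runs.append(cur)'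
  match runs.getLast? with                                     -- runs[-1] guarded by 'if runs else None'
  | none => none
  | some r => PySem.Int.ofChars? r                             -- int(runs[-1])

-- ===== PRECONDITION & SPEC =====
def Spec_get_im_id (s : String) (out : Option Int) : Prop := out = get_im_id_alt s
instance (s : String) (out : Option Int) : Decidable (Spec_get_im_id s out) := by unfold Spec_get_im_id; infer_instance

-- ===== CLAIM (what is proved, stated in full; the proofs are below) =====
def Claim_equal_get_im_id : Prop := ∀ (s : String), Dom_get_im_id s → Spec_get_im_id s (get_im_id s)

-- ===== LEMMAS AND PROOFS =====

-- abbreviation used only by the proofs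
def pvD (c : Char) : Bool := PySem.Chars.isdigit c

-- run phase of A's loop: once start_index is set, end_index tracks the remaining digit prefix
lemma pvLoopA_run (m : List Char) : ∀ (i st en : Int), st > -1 →
    pvLoopA (PySem.List.enumerate m i) st en =
      (st, if m.takeWhile pvD = [] then en else i + (m.takeWhile pvD).length) := by
  induction m with
  | nil => intro i st en _; simp [PySem.List.enumerate_nil, pvLoopA]
  | cons c cs ih =>
    intro i st en hst
    rw [PySem.List.enumerate_cons]
    by_cases hd : PySem.Chars.isdigit c
    · have hne : st ≠ -1 := by omega
      have hD : pvD c = true := hd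
      rw [pvLoopA, if_pos hd, if_neg hne, ih (i + 1) st (i + 1) hst]
      by_cases h2 : cs.takeWhile pvD = []
      · simp [List.takeWhile_cons, hD, h2]
      · simp only [List.takeWhile_cons, hD, if_true, h2, if_false, reduceCtorEq,
          List.length_cons, Prod.mk.injEq, true_and]
        push_cast
        omega
    · have hD : pvD c = false := by simpa [pvD] using hd
      rw [pvLoopA, if_neg hd, if_pos hst]
      simp [List.takeWhile_cons, hD]

-- search phase: A's loop finds the first digit run of m (start index and one-past-end index)
lemma pvLoopA_search (m : List Char) : ∀ (i : Int), 0 ≤ i →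
    pvLoopA (PySem.List.enumerate m i) (-1) (-1) =
      (if (m.dropWhile (fun c => !pvD c)).takeWhile pvD = [] then (-1, -1)
       else (i + (m.takeWhile (fun c => !pvD c)).length,
             i + (m.takeWhile (fun c => !pvD c)).length
               + ((m.dropWhile (fun c => !pvD c)).takeWhile pvD).length)) := by
  induction m with
  | nil => intro i _; simp [PySem.List.enumerate_nil, pvLoopA]
  | cons c cs ih =>
    intro i hi
    rw [PySem.List.enumerate_cons]
    by_cases hd : PySem.Chars.isdigit c
    · have hD : pvD c = true := hd
      rw [pvLoopA, if_pos hd, if_pos rfl, pvLoopA_run cs (i + 1) i (i + 1) (by omega),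
        List.dropWhile_cons_of_neg (by simp [hD]), List.takeWhile_cons_of_pos hD,
        List.takeWhile_cons_of_neg (by simp [hD]), if_neg (List.cons_ne_nil _ _)]
      by_cases h2 : cs.takeWhile pvD = []
      · rw [if_pos h2, h2]
        simp only [List.length_cons, List.length_nil, Prod.mk.injEq]
        push_cast
        omega
      · rw [if_neg h2]
        simp only [List.length_cons, List.length_nil, Prod.mk.injEq]
        push_cast
        omega
    · have hD : pvD c = false := by simpa [pvD] using hd
      rw [pvLoopA, if_neg hd, if_neg (by omega : ¬ ((-1 : Int) > -1)), ih (i + 1) (by omega)]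
      simp only [List.dropWhile_cons, List.takeWhile_cons, hD, Bool.not_false, if_true,
        List.length_cons]
      by_cases h2 : (cs.dropWhile (fun c => !pvD c)).takeWhile pvD = []
      · simp [h2]
      · simp only [h2, if_false, Prod.mk.injEq]
        constructor <;> push_cast <;> omega

-- B's running state: cur is the trailing digit run of the input read so far
lemma pvStepB_snd (l : List Char) :
    (l.foldl pvStepB ([], [])).2 = (l.reverse.takeWhile pvD).reverse := by
  induction l using List.reverseRecOn with
  | nil => simp
  | append_singleton l c ih =>
    rw [List.foldl_append]
    by_cases hd : PySem.Chars.isdigit c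
    · have hD : pvD c = true := hd
      simp [pvStepB, hd, ih, List.takeWhile_cons, hD]
    · have hD : pvD c = false := by simpa [pvD] using hd
      by_cases h2 : (l.foldl pvStepB ([], [])).2 = [] <;>
        simp [pvStepB, hd, h2, List.takeWhile_cons, hD]

-- B's answer: the last digit run of l (stated via the reversed list)
lemma pvStepB_last (l : List Char) :
    ((l.foldl pvStepB ([], [])).1
      ++ (if (l.foldl pvStepB ([], [])).2 = [] then [] else [(l.foldl pvStepB ([], [])).2])).getLast?
    = (if (l.reverse.dropWhile (fun c => !pvD c)).takeWhile pvD = [] then none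
       else some ((l.reverse.dropWhile (fun c => !pvD c)).takeWhile pvD).reverse) := by
  induction l using List.reverseRecOn with
  | nil => simp
  | append_singleton l c ih =>
    rw [List.foldl_append]
    by_cases hd : PySem.Chars.isdigit c
    · have hD : pvD c = true := hd
      have hcur := pvStepB_snd l
      simp only [List.foldl_cons, List.foldl_nil, pvStepB, hd, if_true, List.reverse_append,
        List.reverse_singleton, List.singleton_append, List.dropWhile_cons, List.takeWhile_cons,
        hD, Bool.not_true, Bool.false_eq_true, if_false]
      rw [if_neg (by simp), if_neg (by simp), List.getLast?_concat]
      simp [hcur]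
    · have hD : pvD c = false := by simpa [pvD] using hd
      by_cases h2 : (l.foldl pvStepB ([], [])).2 = []
      · simpa [pvStepB, hd, h2, List.dropWhile_cons, hD] using ih
      · simp only [List.foldl_cons, List.foldl_nil, pvStepB, hd, Bool.false_eq_true, if_false,
          h2, List.reverse_append, List.reverse_singleton, List.singleton_append,
          List.dropWhile_cons, hD, Bool.not_false, if_true, List.append_nil]
        rw [← ih, if_neg h2]

-- a takeWhile prefix is take of its own length
lemma pv_takeWhile_eq_take {p : Char → Bool} (l : List Char) :
    l.takeWhile p = l.take (l.takeWhile p).length :=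
  List.prefix_iff_eq_take.mp (List.takeWhile_prefix p)

-- dropping the first digit-free prefix is dropWhile
lemma pv_drop_takeWhile (p : Char → Bool) (l : List Char) :
    l.drop (l.takeWhile p).length = l.dropWhile p := by
  induction l with
  | nil => rfl
  | cons c cs ih =>
    by_cases h : p c
    · simp [List.takeWhile_cons, List.dropWhile_cons, h, ih]
    · simp [List.takeWhile_cons, List.dropWhile_cons, h]

-- ===== VERDICT (by name: the statement is the Claim_ definition above) =====
theorem get_im_id_spec : Claim_equal_get_im_id := by
  intro s _
  unfold Spec_get_im_id get_im_id get_im_id_alt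
  dsimp only
  set l := s.toList with hl
  set m := l.reverse with hm
  have hA := pvLoopA_search m 0 le_rfl
  set q := (m.dropWhile (fun c => !pvD c)).takeWhile pvD with hq
  set p := m.takeWhile (fun c => !pvD c) with hp
  have hB := pvStepB_last l
  rw [← hm, ← hq] at hB
  by_cases hqe : q = []
  · rw [hA, hB, if_pos hqe, if_pos hqe]
    simp
  · rw [hA, hB, if_neg hqe, if_neg hqe]
    have hne : (0 : Int) + (p.length : Int) ≠ -1 := by omega
    have hslice : PySem.List.slice m (some ((0 : Int) + (p.length : Int)))
        (some ((0 : Int) + (p.length : Int) + (q.length : Int))) = q := by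
      have h0 : ((0 : Int) + (p.length : Int)) = ((p.length : Nat) : Int) := by omega
      rw [h0, PySem.List.slice_natCast_add, hp, pv_drop_takeWhile, hq]
      exact (pv_takeWhile_eq_take _).symm
    rw [if_neg hne, hslice]
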